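-- pv_equiv track=rewrite | github.com/nidepapa/algorithm-notebook | new.py | tempChange
-- ===== SOURCE A (Python) =====
-- def tempChange(a):
--     n = len(a)
--     prefix = [0] * n
--     prefix[0] = a[0]
--     res = 0
--     for i in range(1, n):
--         prefix[i] = prefix[i - 1] + a[i]
--     for day in range(n):
--         past = prefix[day]
--         future = prefix[-1] - prefix[day] + a[day]
--         tmpMax = max(past, future)
--         res = max(res, tmpMax)
--     return res
-- ===== SOURCE B (Python) =====
-- def tempChange(a):
--     # forward pass: running prefix sum, track its maximum (seeded from a[0])
--     s = best = a[0]
--     for x in a[1:]: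
--         s += x
--         best = max(best, s)
--     maxPast = best
--     # backward pass: running suffix sum, track its maximum
--     s = best = a[-1]
--     for x in reversed(a[:-1]):
--         s += x
--         best = max(best, s)
--     maxFuture = best
--     return max(0, maxPast, maxFuture)
-- ===== Notes on version B (the rewrite author's own statement) =====
-- stated objective: simpler
-- what changed: Replaces the materialized prefix-sum array and the per-day max(prefix[day], total-prefix[day]+a[day]) scan with two independent running-max passes (max prefix sum forward, max suffix sum backward), building no array.
import Mathlib
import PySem

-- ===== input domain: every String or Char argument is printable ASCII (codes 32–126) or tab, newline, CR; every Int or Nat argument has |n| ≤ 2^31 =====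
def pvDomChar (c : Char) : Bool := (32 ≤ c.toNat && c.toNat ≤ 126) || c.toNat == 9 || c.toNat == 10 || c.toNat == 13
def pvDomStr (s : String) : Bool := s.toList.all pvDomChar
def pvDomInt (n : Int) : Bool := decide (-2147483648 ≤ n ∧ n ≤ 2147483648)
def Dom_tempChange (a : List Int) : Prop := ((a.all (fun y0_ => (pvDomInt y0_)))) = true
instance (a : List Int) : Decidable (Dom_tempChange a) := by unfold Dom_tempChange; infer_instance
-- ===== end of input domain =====

-- B replaces A's prefix-sum array and per-day scan with two running-max passes
-- (max prefix sum forward, max suffix sum backward): simpler, no array built.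


-- ===== PORT A =====
-- the prefix array is written strictly left to right (cell i from cell i-1),
-- so the loop 'for i in range(1, n): prefix[i] = prefix[i-1] + a[i]' is ported
-- as sequential appends, reading a[1..] structurally
def pvBuildPrefix (p : List Int) : List Int → List Int
  | [] => p
  | y :: ys => pvBuildPrefix (p ++ [p.getLast! + y]) ys

def tempChange (a : List Int) : Int :=
  match a with
  | [] => 0   -- Python raises IndexError at 'prefix[0] = a[0]'; excluded by Pre_
  | x :: xs =>
    let pfx := pvBuildPrefix [x] xs      -- 'prefix' is a Lean keyword
    let last := pfx.getLast!             -- prefix[-1]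
    -- 'for day in range(n)' reads prefix[day] and a[day]: ported over zip prefix a
    (pfx.zip a).foldl (fun res pr => max res (max pr.1 (last - pr.1 + pr.2))) 0

-- ===== PORT B =====
-- one pass: running sum s, track max of s (Source B's 's += x; best = max(best, s)')
def pvFwd (s best : Int) : List Int → Int
  | [] => best
  | y :: ys => pvFwd (s + y) (max best (s + y)) ys

def tempChange_alt (a : List Int) : Int :=
  match a with
  | [] => 0   -- Python raises IndexError at 'a[0]'; excluded by Pre_
  | x :: xs =>
    let maxPast := pvFwd x x xs
    let r := (x :: xs).reverse           -- a[-1] then reversed(a[:-1])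
    let maxFuture := pvFwd r.headI r.headI r.tail
    max 0 (max maxPast maxFuture)

-- ===== PRECONDITION & SPEC =====
-- Pre_ excludes only the empty list, on which both A and B raise IndexError.
def Pre_tempChange (a : List Int) : Prop := a ≠ []
instance (a : List Int) : Decidable (Pre_tempChange a) := by unfold Pre_tempChange; infer_instance
def pvWitness_tempChange : List Int := [3, -5, 2]

def Spec_tempChange (a : List Int) (out : Int) : Prop := out = tempChange_alt a
instance (a : List Int) (out : Int) : Decidable (Spec_tempChange a out) := by unfold Spec_tempChange; infer_instance

-- ===== CLAIM (what is proved, stated in full; the proofs are below) =====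
def Claim_equal_tempChange : Prop := ∀ (a : List Int), Dom_tempChange a → Pre_tempChange a → Spec_tempChange a (tempChange a)

-- ===== LEMMAS AND PROOFS =====

-- prefix sums s, s+y1, s+y1+y2, …
def pvScan (s : Int) : List Int → List Int
  | [] => [s]
  | y :: ys => s :: pvScan (s + y) ys

-- suffix sums: (pvSuf l)[i] = sum of l[i:]
def pvSuf : List Int → List Int
  | [] => []
  | y :: ys => (y + ys.sum) :: pvSuf ys

theorem pvScan_ne_nil (s : Int) (l : List Int) : pvScan s l ≠ [] := by
  cases l <;> simp [pvScan]

theorem pvScan_length (s : Int) (l : List Int) : (pvScan s l).length = l.length + 1 := by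
  induction l generalizing s with
  | nil => simp [pvScan]
  | cons y ys ih => simp [pvScan, ih]

theorem pvScan_getLast! (s : Int) (l : List Int) : (pvScan s l).getLast! = s + l.sum := by
  induction l generalizing s with
  | nil => simp [pvScan]
  | cons y ys ih =>
    obtain ⟨v, hv⟩ := Option.isSome_iff_exists.mp
      (List.getLast?_isSome.mpr (pvScan_ne_nil (s + y) ys))
    rw [pvScan, List.getLast!_eq_getLast?_getD, List.getLast?_cons, hv]
    have := ih (s + y)
    rw [List.getLast!_eq_getLast?_getD, hv] at this
    simp only [Option.getD_some, List.sum_cons] at this ⊢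
    omega

theorem pvBuildPrefix_eq (l : List Int) : ∀ (q : List Int) (g : Int),
    pvBuildPrefix (q ++ [g]) l = q ++ pvScan g l := by
  induction l with
  | nil => intro q g; simp [pvBuildPrefix, pvScan]
  | cons y ys ih =>
    intro q g
    rw [pvBuildPrefix]
    have hg : (q ++ [g]).getLast! = g := by simp [List.getLast!_eq_getLast?_getD]
    rw [hg, List.append_assoc]
    rw [show ([g] ++ [g + y] : List Int) = [g] ++ [g + y] from rfl]
    rw [← List.append_assoc, ih (q ++ [g]) (g + y)]
    simp [pvScan]

-- pull a max out of foldl max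
theorem foldl_max_pull (l : List Int) : ∀ (r c : Int),
    List.foldl max (max r c) l = max (List.foldl max r l) c := by
  induction l with
  | nil => intro r c; rfl
  | cons y ys ih =>
    intro r c
    simp only [List.foldl_cons]
    rw [show max (max r c) y = max (max r y) c by omega, ih]

theorem foldl_max_reverse (l : List Int) : ∀ (r : Int),
    List.foldl max r l.reverse = List.foldl max r l := by
  induction l with
  | nil => intro r; rfl
  | cons y ys ih =>
    intro r
    rw [List.reverse_cons, List.foldl_append, ih]
    simp only [List.foldl_cons, List.foldl_nil]
    rw [← foldl_max_pull]

-- split a foldl max over pointwise maxima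
theorem foldl_max_split {α : Type} (g h : α → Int) (l : List α) : ∀ (r : Int),
    List.foldl max r (l.map (fun p => max (g p) (h p))) =
      max (List.foldl max r (l.map g)) (List.foldl max r (l.map h)) := by
  induction l with
  | nil => intro r; simp
  | cons p ps ih =>
    intro r
    simp only [List.map_cons, List.foldl_cons]
    rw [foldl_max_pull, ih r, foldl_max_pull, foldl_max_pull]
    omega

theorem pvFwd_eq_foldl (l : List Int) : ∀ (s b : Int),
    pvFwd s b l = List.foldl max b (pvScan s l).tail := by
  induction l with
  | nil => intro s b; rfl
  | cons y ys ih =>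
    intro s b
    rw [pvFwd, ih]
    have hs : pvScan (s + y) ys = (s + y) :: (pvScan (s + y) ys).tail := by
      cases ys <;> simp [pvScan]
    conv_rhs => rw [pvScan, List.tail_cons, hs]
    simp

-- the futures column of A's scan equals the suffix sums
theorem map_future_zip (l : List Int) : ∀ (u s L : Int), L = s + l.sum →
    ((pvScan s l).zip (u :: l)).map (fun pr => L - pr.1 + pr.2) = pvSuf (u :: l) := by
  induction l with
  | nil => intro u s L hL; simp [pvScan, pvSuf, hL]
  | cons y ys ih =>
    intro u s L hL
    rw [List.sum_cons] at hL
    rw [pvScan, pvSuf]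
    simp only [List.zip_cons_cons, List.map_cons]
    rw [ih y (s + y) L (by rw [hL]; ring)]
    rw [pvSuf]
    congr 1
    rw [hL]
    simp only [List.sum_cons]
    ring

theorem map_fst_zip_scan (x : Int) (xs : List Int) :
    ((pvScan x xs).zip (x :: xs)).map Prod.fst = pvScan x xs := by
  apply List.map_fst_zip
  rw [pvScan_length]
  simp

-- suffix sums are the reverse of the scan of the reversed list
theorem pvSuf_append_pair (m : List Int) (y z : Int) :
    pvSuf (m ++ [y, z]) = pvSuf (m ++ [y + z]) ++ [z] := by
  induction m with
  | nil => simp [pvSuf]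
  | cons w ws ih => simp [pvSuf, ih]

theorem pvScan_eq_suf_reverse (l : List Int) : ∀ (z : Int),
    pvScan z l = (pvSuf (l.reverse ++ [z])).reverse := by
  induction l with
  | nil => intro z; simp [pvScan, pvSuf]
  | cons y ys ih =>
    intro z
    rw [pvScan, ih (z + y)]
    have h1 : (y :: ys).reverse ++ [z] = ys.reverse ++ [y, z] := by simp
    rw [h1, pvSuf_append_pair, List.reverse_append]
    rw [show y + z = z + y from by ring]
    rfl

theorem tempChange_eq (x : Int) (xs : List Int) :
    tempChange (x :: xs) =
      max (List.foldl max 0 (pvScan x xs)) (List.foldl max 0 (pvSuf (x :: xs))) := by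
  have hbuild : pvBuildPrefix [x] xs = pvScan x xs := by
    simpa using pvBuildPrefix_eq xs [] x
  simp only [tempChange, hbuild, pvScan_getLast!]
  have hmap : List.foldl (fun res pr => max res (max pr.1 (x + xs.sum - pr.1 + pr.2))) 0
        ((pvScan x xs).zip (x :: xs))
      = List.foldl max 0 (((pvScan x xs).zip (x :: xs)).map
          (fun pr => max pr.1 (x + xs.sum - pr.1 + pr.2))) := by
    rw [List.foldl_map]
  rw [hmap, foldl_max_split (fun pr : Int × Int => pr.1)
        (fun pr : Int × Int => x + xs.sum - pr.1 + pr.2)]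
  rw [map_fst_zip_scan, map_future_zip xs x x (x + xs.sum) rfl]

theorem tempChange_alt_eq (x : Int) (xs : List Int) :
    tempChange_alt (x :: xs) =
      max (List.foldl max 0 (pvScan x xs)) (List.foldl max 0 (pvSuf (x :: xs))) := by
  simp only [tempChange_alt]
  obtain ⟨z, zs, hr⟩ : ∃ z zs, (x :: xs).reverse = z :: zs := by
    cases h : (x :: xs).reverse with
    | nil => exact absurd h (by simp)
    | cons z zs => exact ⟨z, zs, rfl⟩
  simp only [hr, List.headI, List.tail_cons]
  have hpast : List.foldl max 0 (pvScan x xs) = max (pvFwd x x xs) 0 := by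
    rw [pvFwd_eq_foldl]
    have hs : pvScan x xs = x :: (pvScan x xs).tail := by cases xs <;> simp [pvScan]
    conv_lhs => rw [hs]
    simp only [List.foldl_cons]
    rw [show max (0 : Int) x = max x 0 from by omega, foldl_max_pull]
  have hsuf : pvSuf (x :: xs) = (pvScan z zs).reverse := by
    rw [pvScan_eq_suf_reverse zs z]
    have h2 : zs.reverse ++ [z] = x :: xs := by
      simpa using (congrArg List.reverse hr).symm
    rw [h2, List.reverse_reverse]
  have hfut : List.foldl max 0 (pvSuf (x :: xs)) = max (pvFwd z z zs) 0 := by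
    rw [hsuf, foldl_max_reverse, pvFwd_eq_foldl]
    have hs : pvScan z zs = z :: (pvScan z zs).tail := by cases zs <;> simp [pvScan]
    conv_lhs => rw [hs]
    simp only [List.foldl_cons]
    rw [show max (0 : Int) z = max z 0 from by omega, foldl_max_pull]
  rw [hpast, hfut]
  omega

-- ===== VERDICT (by name: the statement is the Claim_ definition above) =====
theorem tempChange_spec : Claim_equal_tempChange := by
  intro a _ hpre
  unfold Spec_tempChange
  cases a with
  | nil => exact absurd rfl hpre
  | cons x xs => rw [tempChange_eq, tempChange_alt_eq]
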